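-- pv_equiv track=rewrite | github.com/YUYUJIN/codingStudy | programmers/120835.py | solution
-- ===== SOURCE A (Python) =====
-- def solution(emergency):
--     answer = [0 for i in range(len(emergency))]
--     for i in range(len(emergency)):
--         count=1
--         for j in range(len(emergency)):
--             if emergency[i]<emergency[j]:
--                 count+=1
--         answer[i]=count
--     return answer
-- ===== SOURCE B (Python) =====
-- def solution(emergency):
--     rank = {}
--     for idx, v in enumerate(sorted(emergency, reverse=True)):
--         if v not in rank:
--             rank[v] = idx + 1
--     return [rank[v] for v in emergency]
-- ===== Notes on version B (the rewrite author's own statement) =====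
-- stated objective: faster
-- what changed: Replaces the O(n^2) nested counting loops by sorting descending once and reading each value's rank as its first index in the sorted list via a dict, then mapping over the input.
import Mathlib
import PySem

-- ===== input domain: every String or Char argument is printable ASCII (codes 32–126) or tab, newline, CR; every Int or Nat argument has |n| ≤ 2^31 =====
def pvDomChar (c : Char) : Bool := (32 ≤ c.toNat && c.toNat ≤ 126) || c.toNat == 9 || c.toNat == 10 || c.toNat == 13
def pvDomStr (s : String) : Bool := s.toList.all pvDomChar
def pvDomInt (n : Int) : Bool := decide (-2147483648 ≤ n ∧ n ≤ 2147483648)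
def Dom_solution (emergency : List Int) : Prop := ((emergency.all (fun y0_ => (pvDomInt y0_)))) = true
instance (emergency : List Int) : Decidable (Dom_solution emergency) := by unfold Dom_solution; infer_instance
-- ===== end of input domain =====

-- B replaces A's O(n^2) nested counting loops by one descending sort plus a first-occurrence rank dict (objective: faster, asymptotic).

-- ===== PORT A =====
-- indices i, j from range(0, len) are in range, so pyGetD _ _ 0 and i.toNat for list.set are exact here
def solution (emergency : List Int) : List Int :=
  let answer := (PySem.List.pyRange 0 (emergency.length : Int) 1).map (fun _ => (0 : Int))
  (PySem.List.pyRange 0 (emergency.length : Int) 1).foldl (fun answer i =>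
    let count := (PySem.List.pyRange 0 (emergency.length : Int) 1).foldl (fun count j =>
      if PySem.List.pyGetD emergency i 0 < PySem.List.pyGetD emergency j 0 then count + 1 else count)
      (1 : Int)
    answer.set i.toNat count) answer

-- ===== PORT B =====
-- the 'for idx, v in enumerate(...)' loop, carrying idx explicitly
def buildRank : List Int → Int → PySem.Dict Int Int → PySem.Dict Int Int
  | [], _, d => d
  | v :: t, idx, d =>
    buildRank t (idx + 1) (if d.contains v then d else d.insert v (idx + 1))

-- rank[v]: v is always a key of rank (every element of emergency occurs in the sorted list), so get?.getD 0 is exact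
def solution_alt (emergency : List Int) : List Int :=
  let rank := buildRank (PySem.List.sorted emergency (fun x => x) true) 0 PySem.Dict.empty
  emergency.map (fun v => (rank.get? v).getD 0)

-- ===== PRECONDITION & SPEC =====
def Spec_solution (emergency : List Int) (out : List Int) : Prop := out = solution_alt emergency
instance (emergency : List Int) (out : List Int) : Decidable (Spec_solution emergency out) := by unfold Spec_solution; infer_instance

-- ===== CLAIM (what is proved, stated in full; the proofs are below) =====
def Claim_equal_solution : Prop := ∀ (emergency : List Int), Dom_solution emergency → Spec_solution emergency (solution emergency)

-- ===== LEMMAS AND PROOFS =====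

-- the common target value: 1 + (number of elements of l strictly greater than v)
def rankOf (l : List Int) (v : Int) : Int := 1 + (l.countP (fun w => decide (v < w)) : Int)

-- index-space counting equals list counting
lemma countP_range_getD (l : List Int) (p : Int → Bool) :
    (List.range l.length).countP (fun k => p (l.getD k 0)) = l.countP p := by
  induction l with
  | nil => simp
  | cons x t ih =>
    rw [List.length_cons, List.range_succ_eq_map]
    simp only [List.getD_eq_getElem?_getD] at ih
    simp [List.countP_cons, List.countP_map, Function.comp_def, List.getElem?_cons_succ, ih]

-- A's inner loop counts the strictly greater elements
lemma inner_loop_eq (l : List Int) (v : Int) (c : Int) :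
    (PySem.List.pyRange 0 (l.length : Int) 1).foldl (fun count j =>
      if v < PySem.List.pyGetD l j 0 then count + 1 else count) c
    = c + (l.countP (fun w => decide (v < w)) : Int) := by
  rw [PySem.List.pyRange_one, List.foldl_map]
  have h := PySem.List.foldl_count_if (fun k : Nat => decide (v < l.getD k 0))
    (List.range (((l.length : Int) - 0).toNat)) c
  simp only [zero_add, PySem.List.pyGetD_natCast, decide_eq_true_eq, Int.sub_zero,
    Int.toNat_natCast] at h ⊢
  rw [h, countP_range_getD l (fun w => decide (v < w))]

-- writing g k at every index k of a list of length ≥ n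
lemma set_loop (g : Nat → Int) (a : List Int) :
    ∀ n, n ≤ a.length →
      (List.range n).foldl (fun ans k => ans.set k (g k)) a
        = (List.range n).map g ++ a.drop n := by
  intro n
  induction n with
  | zero => simp
  | succ m ih =>
    intro h
    have hm : m < a.length := h
    rw [List.range_succ, List.foldl_append, ih (Nat.le_of_lt hm)]
    simp only [List.foldl_cons, List.foldl_nil]
    have hdrop : a.drop m = a[m] :: a.drop (m + 1) := List.drop_eq_getElem_cons hm
    rw [List.set_append_right _ _ (by simp)]
    have hlen : (List.map g (List.range m)).length = m := by simp
    rw [hlen, Nat.sub_self, hdrop, List.set_cons_zero, List.map_append]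
    simp

-- map in index space equals map on the list
lemma map_range_getD (l : List Int) (f : Int → Int) :
    (List.range l.length).map (fun k => f (l.getD k 0)) = l.map f := by
  induction l with
  | nil => simp
  | cons x t ih =>
    rw [List.length_cons, List.range_succ_eq_map]
    simp only [List.getD_eq_getElem?_getD] at ih
    simp [List.map_map, Function.comp_def, List.getElem?_cons_succ, ih]

-- A's outer loop writes rankOf at each index over the zero list
lemma outer_loop_eq (l : List Int) :
    solution l = l.map (rankOf l) := by
  unfold solution
  simp only [inner_loop_eq]
  simp only [PySem.List.pyRange_one, List.foldl_map, List.map_map]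
  simp only [zero_add, PySem.List.pyGetD_natCast, Int.toNat_natCast, Int.sub_zero]
  rw [set_loop (fun k => 1 + (l.countP (fun w => decide (l.getD k 0 < w)) : Int))
    _ l.length (by simp)]
  rw [List.drop_eq_nil_of_le (by simp), List.append_nil]
  simpa [rankOf] using map_range_getD l (rankOf l)

lemma buildRank_get?_present (s : List Int) (idx : Int) (d : PySem.Dict Int Int) (v : Int) (r : Int)
    (h : d.get? v = some r) : (buildRank s idx d).get? v = some r := by
  induction s generalizing idx d with
  | nil => simpa [buildRank] using h
  | cons x t ih =>
    simp only [buildRank]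
    split
    · exact ih _ _ h
    · by_cases hx : v = x
      · subst hx
        have : d.contains v = true := by
          rw [PySem.Dict.contains_eq_isSome_get?, h]; rfl
        simp_all
      · exact ih _ _ (by rw [PySem.Dict.get?_insert_of_ne _ _ hx]; exact h)

lemma buildRank_get?_fresh (s : List Int) (idx : Int) (d : PySem.Dict Int Int) (v : Int)
    (hd : d.get? v = none) (hv : v ∈ s) :
    (buildRank s idx d).get? v = some (idx + (s.idxOf v : Int) + 1) := by
  induction s generalizing idx d with
  | nil => cases hv
  | cons x t ih =>
    by_cases hx : x = v
    · subst hx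
      have hc : d.contains x = false := by
        rw [PySem.Dict.contains_eq_isSome_get?, hd]; rfl
      have := buildRank_get?_present t (idx + 1) (d.insert x (idx + 1)) x (idx + 1)
        (PySem.Dict.get?_insert_self d x (idx + 1))
      simpa [buildRank, hc, List.idxOf_cons_self] using this
    · have hvt : v ∈ t := by cases hv with
        | head => exact absurd rfl hx
        | tail _ h => exact h
      simp only [buildRank]
      have hidx : (((x :: t).idxOf v : Nat) : Int) = (t.idxOf v : Int) + 1 := by
        rw [List.idxOf_cons_ne _ (by exact fun h => hx (by simpa using h))]
        push_cast; ring
      split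
      · rw [ih _ _ hd hvt]; rw [hidx]; ring_nf
      · have hd' : (d.insert x (idx + 1)).get? v = none := by
          rw [PySem.Dict.get?_insert_of_ne _ _ (fun h => hx h.symm)]; exact hd
        rw [ih _ _ hd' hvt, hidx]; ring_nf

-- in a weakly descending list, the first index of v counts the elements strictly above v
lemma idxOf_desc_eq_countP (s : List Int) (v : Int)
    (hp : s.Pairwise (fun a b => b ≤ a)) (hv : v ∈ s) :
    s.idxOf v = s.countP (fun w => decide (v < w)) := by
  induction s with
  | nil => cases hv
  | cons x t ih =>
    rcases List.pairwise_cons.mp hp with ⟨hx, ht⟩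
    by_cases hxv : x = v
    · subst hxv
      have : t.countP (fun w => decide (x < w)) = 0 := by
        rw [List.countP_eq_zero]
        intro w hw
        simpa using not_lt.mpr (hx w hw)
      simp [List.idxOf_cons_self, this]
    · have hvt : v ∈ t := by cases hv with
        | head => exact absurd rfl hxv
        | tail _ h => exact h
      have hlt : v < x := lt_of_le_of_ne (le_trans (le_of_eq rfl) (hx v hvt)) (fun h => hxv h.symm)
      rw [List.idxOf_cons_ne _ (by exact fun h => hxv (by simpa using h))]
      rw [List.countP_cons, ih ht hvt]
      simp [hlt]

lemma alt_eq_map (l : List Int) : solution_alt l = l.map (rankOf l) := by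
  unfold solution_alt
  apply List.map_congr_left
  intro v hv
  have hvs : v ∈ PySem.List.sorted l (fun x => x) true := by
    rw [PySem.List.mem_sorted]; exact hv
  have hp : (PySem.List.sorted l (fun x => x) true).Pairwise (fun a b => b ≤ a) :=
    PySem.List.sorted_pairwise_rev l (fun x => x) 
  rw [buildRank_get?_fresh _ 0 _ v (PySem.Dict.get?_empty v) hvs]
  rw [idxOf_desc_eq_countP _ v hp hvs]
  rw [(PySem.List.sorted_perm l (fun x => x) true).countP_eq]
  simp [rankOf]
  ring

-- ===== VERDICT (by name: the statement is the Claim_ definition above) =====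
theorem solution_spec : Claim_equal_solution := by
  intro l _
  unfold Spec_solution
  rw [outer_loop_eq, alt_eq_map]
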